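-- pv_equiv track=rewrite | github.com/jerdaw/healtharchive-backend | src/ha_backend/live_compare.py | _compute_section_stats
-- ===== SOURCE A (Python) =====
-- from typing import Optional
--
-- def _compute_section_stats(
--     doc_a: Optional[dict[str, str]],
--     doc_b: Optional[dict[str, str]],
-- ) -> tuple[int, int, int]:
--     if not doc_a and not doc_b:
--         return 0, 0, 0
--
--     sections_a = set(doc_a.keys()) if doc_a else set()
--     sections_b = set(doc_b.keys()) if doc_b else set()
--
--     added = len(sections_b - sections_a)
--     removed = len(sections_a - sections_b)
--
--     common = sections_a & sections_b
--     changed = 0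
--     for title in common:
--         if (doc_a or {}).get(title, "") != (doc_b or {}).get(title, ""):
--             changed += 1
--
--     return added, removed, changed
-- ===== SOURCE B (Python) =====
-- from typing import Optional
--
--
-- def _compute_section_stats(
--     doc_a: Optional[dict[str, str]],
--     doc_b: Optional[dict[str, str]],
-- ) -> tuple[int, int, int]:
--     da = doc_a or {}
--     db = doc_b or {}
--     added = removed = changed = 0
--     for title, value in da.items():
--         if title not in db:
--             removed += 1
--         elif value != db[title]:
--             changed += 1
--     for title in db:
--         if title not in da:
--             added += 1
--     return added, removed, changed
-- ===== Notes on version B (the rewrite author's own statement) =====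
-- stated objective: simpler
-- what changed: Replaces the set-difference/intersection construction (three materialized key sets plus a loop over the intersection) by two direct membership loops over the dicts that count added/removed/changed in one pass each, avoiding building any intermediate sets; no early return needed.
import Mathlib
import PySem

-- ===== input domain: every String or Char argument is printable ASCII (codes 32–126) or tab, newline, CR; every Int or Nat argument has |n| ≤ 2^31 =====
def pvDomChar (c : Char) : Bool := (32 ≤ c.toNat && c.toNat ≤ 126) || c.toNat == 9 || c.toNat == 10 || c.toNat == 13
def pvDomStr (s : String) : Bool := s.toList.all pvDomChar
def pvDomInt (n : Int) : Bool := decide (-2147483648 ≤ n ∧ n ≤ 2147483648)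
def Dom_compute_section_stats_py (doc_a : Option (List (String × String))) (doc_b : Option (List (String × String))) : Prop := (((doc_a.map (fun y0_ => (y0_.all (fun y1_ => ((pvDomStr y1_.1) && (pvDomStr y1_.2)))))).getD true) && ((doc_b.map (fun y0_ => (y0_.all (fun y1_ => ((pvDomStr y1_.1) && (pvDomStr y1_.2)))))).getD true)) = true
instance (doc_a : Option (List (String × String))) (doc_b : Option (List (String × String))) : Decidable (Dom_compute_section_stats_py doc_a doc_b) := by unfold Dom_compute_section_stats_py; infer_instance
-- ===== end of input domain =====

-- B replaces A's set-difference/intersection construction by two direct membership loops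
-- over the dicts, counting added/removed/changed in one pass each (objective: simpler).


-- ===== PORT A =====
-- None and {} are both falsy in Python, so doc_a/doc_b are read through getD []
def compute_section_stats_py (doc_a : Option (List (String × String))) (doc_b : Option (List (String × String))) : Int × Int × Int :=
  let la := doc_a.getD []
  let lb := doc_b.getD []
  let truthy_a : Bool := !la.isEmpty
  let truthy_b : Bool := !lb.isEmpty
  if !truthy_a && !truthy_b then (0, 0, 0)
  else
    let da : PySem.Dict String String := PySem.Dict.mk la
    let db : PySem.Dict String String := PySem.Dict.mk lb
    let sections_a : PySem.Set String := if truthy_a then PySem.Set.ofList da.keys else PySem.Set.empty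
    let sections_b : PySem.Set String := if truthy_b then PySem.Set.ofList db.keys else PySem.Set.empty
    let added : Int := PySem.Set.len (PySem.Set.diff sections_b sections_a)
    let removed : Int := PySem.Set.len (PySem.Set.diff sections_a sections_b)
    let common : PySem.Set String := PySem.Set.inter sections_a sections_b
    let changed : Int := common.foldl (fun c title =>
      if (if truthy_a then da else PySem.Dict.empty).getD title "" ≠
         (if truthy_b then db else PySem.Dict.empty).getD title "" then c + 1 else c) 0
    (added, removed, changed)


-- ===== PORT B =====
def compute_section_stats_py_alt (doc_a : Option (List (String × String))) (doc_b : Option (List (String × String))) : Int × Int × Int :=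
  let da : PySem.Dict String String := PySem.Dict.mk (doc_a.getD [])
  let db : PySem.Dict String String := PySem.Dict.mk (doc_b.getD [])
  let rc : Int × Int := da.items.foldl (fun rc p =>
      match db.get? p.1 with
      | none => (rc.1 + 1, rc.2)
      | some w => if p.2 ≠ w then (rc.1, rc.2 + 1) else rc) (0, 0)
  let added : Int := db.items.foldl (fun a p => if da.contains p.1 then a else a + 1) 0
  (added, rc.1, rc.2)


-- ===== PRECONDITION & SPEC =====
-- Pre_ requires each association list to have distinct keys: the lists model Python dicts,
-- which can never hold a duplicate key, so duplicate-key lists correspond to no Python input.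
def Pre_compute_section_stats_py (doc_a : Option (List (String × String))) (doc_b : Option (List (String × String))) : Prop :=
  ((doc_a.getD []).map Prod.fst).Nodup ∧ ((doc_b.getD []).map Prod.fst).Nodup
instance (doc_a : Option (List (String × String))) (doc_b : Option (List (String × String))) : Decidable (Pre_compute_section_stats_py doc_a doc_b) := by unfold Pre_compute_section_stats_py; infer_instance
def pvWitness_compute_section_stats_py : (Option (List (String × String))) × (Option (List (String × String))) :=
  (some [("intro", "x"), ("body", "y")], some [("body", "z")])

def Spec_compute_section_stats_py (doc_a : Option (List (String × String))) (doc_b : Option (List (String × String))) (out : Int × Int × Int) : Prop := out = compute_section_stats_py_alt doc_a doc_b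
instance (doc_a : Option (List (String × String))) (doc_b : Option (List (String × String))) (out : Int × Int × Int) : Decidable (Spec_compute_section_stats_py doc_a doc_b out) := by unfold Spec_compute_section_stats_py; infer_instance

-- ===== CLAIM (what is proved, stated in full; the proofs are below) =====
def Claim_equal_compute_section_stats_py : Prop := ∀ (doc_a : Option (List (String × String))) (doc_b : Option (List (String × String))), Dom_compute_section_stats_py doc_a doc_b → Pre_compute_section_stats_py doc_a doc_b → Spec_compute_section_stats_py doc_a doc_b (compute_section_stats_py doc_a doc_b)

-- ===== LEMMAS AND PROOFS =====

theorem pv_contains_mk (l : List (String × String)) (t : String) :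
    (PySem.Dict.mk l).contains t = (l.map Prod.fst).contains t := by
  simp [PySem.Dict.contains_eq_decide_mem_keys]

theorem pv_isNone_get?_mk (l : List (String × String)) (t : String) :
    ((PySem.Dict.mk l).get? t).isNone = !((l.map Prod.fst).contains t) := by
  rw [← pv_contains_mk, PySem.Dict.contains_eq_isSome_get?]
  cases (PySem.Dict.mk l).get? t <;> rfl

theorem pv_foldl_count_prop {α : Type} (l : List α) (P : α → Prop) [DecidablePred P] (a : Int) :
    l.foldl (fun a x => if P x then a + 1 else a) a = a + (l.countP (fun x => decide (P x)) : Int) := by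
  induction l generalizing a with
  | nil => simp
  | cons p l ih =>
    simp only [List.foldl_cons, List.countP_cons, ih]
    by_cases h : P p <;> simp [h] <;> omega

theorem pv_foldl_count' {α : Type} (l : List α) (g : α → Bool) (a : Int) :
    l.foldl (fun a x => if g x then a else a + 1) a = a + (l.countP (fun x => !g x) : Int) := by
  induction l generalizing a with
  | nil => simp
  | cons p l ih =>
    simp only [List.foldl_cons, List.countP_cons, ih]
    by_cases h : g p = true <;> simp [h] <;> omega

theorem pv_foldl_rc (db : PySem.Dict String String) (l : List (String × String)) (r c : Int) :
    l.foldl (fun rc p =>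
      match db.get? p.1 with
      | none => (rc.1 + 1, rc.2)
      | some w => if p.2 ≠ w then (rc.1, rc.2 + 1) else rc) (r, c)
    = (r + (l.countP (fun p => (db.get? p.1).isNone) : Int),
       c + (l.countP (fun p => match db.get? p.1 with
                               | none => false
                               | some w => decide (p.2 ≠ w)) : Int)) := by
  induction l generalizing r c with
  | nil => simp
  | cons p l ih =>
    rw [List.foldl_cons, List.countP_cons, List.countP_cons]
    cases h : db.get? p.1 with
    | none =>
      simp only [h]
      rw [ih]
      simp
      omega
    | some w =>
      by_cases hw : p.2 = w
      · simp only [h, hw]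
        simp only [ne_eq, not_true_eq_false, if_false]
        rw [ih]
        simp [hw]
      · simp only [h]
        rw [if_pos (by exact hw)]
        rw [ih]
        simp [hw]
        omega

theorem pv_Bval (la lb : List (String × String)) :
    compute_section_stats_py_alt (some la) (some lb) =
    ((lb.countP (fun p => !((PySem.Dict.mk la).contains p.1)) : Int),
     (la.countP (fun p => ((PySem.Dict.mk lb).get? p.1).isNone) : Int),
     (la.countP (fun p => match (PySem.Dict.mk lb).get? p.1 with
                          | none => false | some w => decide (p.2 ≠ w)) : Int)) := by
  simp only [compute_section_stats_py_alt, Option.getD_some]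
  rw [pv_foldl_rc]
  simp only [Prod.mk.injEq]
  refine ⟨(pv_foldl_count' lb (fun p => (PySem.Dict.mk la).contains p.1) 0).trans (by simp), by simp, by simp⟩

theorem pv_Aval (la lb : List (String × String))
    (ha : (la.map Prod.fst).Nodup) (hb : (lb.map Prod.fst).Nodup) :
    compute_section_stats_py (some la) (some lb) =
    ((lb.countP (fun p => !((PySem.Dict.mk la).contains p.1)) : Int),
     (la.countP (fun p => ((PySem.Dict.mk lb).get? p.1).isNone) : Int),
     (la.countP (fun p => match (PySem.Dict.mk lb).get? p.1 with
                          | none => false | some w => decide (p.2 ≠ w)) : Int)) := by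
  simp only [compute_section_stats_py, Option.getD_some]
  by_cases h0 : la = [] ∧ lb = []
  · obtain ⟨h1, h2⟩ := h0; subst h1; subst h2; simp
  · rw [if_neg (by simp only [Bool.not_not, Bool.and_eq_true, List.isEmpty_iff]; tauto)]
    have hsa : (if (!la.isEmpty) then PySem.Set.ofList (PySem.Dict.mk la).keys else PySem.Set.empty) = la.map Prod.fst := by
      by_cases h : la = []
      · subst h; rfl
      · rw [if_pos (by simpa using h)]
        simpa using PySem.Set.ofList_eq_self_of_nodup _ ha
    have hsb : (if (!lb.isEmpty) then PySem.Set.ofList (PySem.Dict.mk lb).keys else PySem.Set.empty) = lb.map Prod.fst := by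
      by_cases h : lb = []
      · subst h; rfl
      · rw [if_pos (by simpa using h)]
        simpa using PySem.Set.ofList_eq_self_of_nodup _ hb
    have hda : (if (!la.isEmpty) then PySem.Dict.mk la else PySem.Dict.empty) = PySem.Dict.mk la := by
      by_cases h : la = []
      · subst h; simp [PySem.Dict.empty]
      · rw [if_pos (by simpa using h)]
    have hdb : (if (!lb.isEmpty) then PySem.Dict.mk lb else PySem.Dict.empty) = PySem.Dict.mk lb := by
      by_cases h : lb = []
      · subst h; simp [PySem.Dict.empty]
      · rw [if_pos (by simpa using h)]
    rw [hsa, hsb, hda, hdb]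
    simp only [PySem.Set.diff, PySem.Set.inter, PySem.Set.len, Prod.mk.injEq]
    refine ⟨?_, ?_, ?_⟩
    · simp only [← List.countP_eq_length_filter, List.countP_map, Function.comp_def,
        PySem.Set.contains, pv_contains_mk]
    · simp only [← List.countP_eq_length_filter, List.countP_map, Function.comp_def,
        PySem.Set.contains, pv_isNone_get?_mk]
    · rw [pv_foldl_count_prop]
      simp only [zero_add, List.countP_filter, List.countP_map, Function.comp_def]
      congr 1
      apply List.countP_congr
      intro p hp
      have hga : (PySem.Dict.mk la).getD p.1 "" = p.2 :=
        PySem.Dict.getD_of_mem_items _ (by simpa using hp) (by simpa using ha) ""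
      cases h : (PySem.Dict.mk lb).get? p.1 with
      | none =>
        have hc : (List.map Prod.fst lb).contains p.1 = false := by
          rw [← pv_contains_mk, PySem.Dict.contains_eq_isSome_get?, h]; rfl
        simp only [PySem.Set.contains, hc, Bool.and_false, h]
      | some w =>
        have hc : (List.map Prod.fst lb).contains p.1 = true := by
          rw [← pv_contains_mk, PySem.Dict.contains_eq_isSome_get?, h]; rfl
        have hgb : (PySem.Dict.mk lb).getD p.1 "" = w := PySem.Dict.getD_of_get?_eq_some _ "" h
        simp [PySem.Set.contains, hc, h, hga, hgb]
        intro _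
        exact ⟨w, PySem.Dict.mem_items_of_get?_eq_some _ h⟩

-- ===== VERDICT (by name: the statement is the Claim_ definition above) =====
theorem compute_section_stats_py_spec : Claim_equal_compute_section_stats_py := by
  intro doc_a doc_b _ hpre
  obtain ⟨ha, hb⟩ := hpre
  show compute_section_stats_py doc_a doc_b = compute_section_stats_py_alt doc_a doc_b
  rcases doc_a with _ | la <;> rcases doc_b with _ | lb
  · exact (pv_Aval [] [] (by simp) (by simp)).trans (pv_Bval [] []).symm
  · exact (pv_Aval [] lb (by simp) (by simpa using hb)).trans (pv_Bval [] lb).symm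
  · exact (pv_Aval la [] (by simpa using ha) (by simp)).trans (pv_Bval la []).symm
  · exact (pv_Aval la lb (by simpa using ha) (by simpa using hb)).trans (pv_Bval la lb).symm
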